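-- pv_equiv track=rewrite | github.com/aorursy/KT_dataset_py | priyank1996_fifa2019.py | con_pos
-- ===== SOURCE A (Python) =====
-- def con_pos(pos):
--
--     for p in pos:
--
--         if p == 'M':
--
--             return 'MID'
--
--     for p in pos:
--
--         if p == 'B':
--
--             return 'DEF'
--
--     for p in pos:
--
--         if p == 'G':
--
--             return 'GK'
--
--     else:
--
--         return 'FWD'
-- ===== SOURCE B (Python) =====
-- def con_pos(pos):
--     rank = {'M': 0, 'B': 1, 'G': 2}
--     best = 3
--     for p in pos:
--         best = min(best, rank.get(p, 3))
--     return ('MID', 'DEF', 'GK', 'FWD')[best]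
-- ===== Notes on version B (the rewrite author's own statement) =====
-- stated objective: alternative
-- what changed: B makes a single pass folding the minimum priority rank (M=0,B=1,G=2,other=3) over the characters and returns the role by indexing a table with that rank, instead of A's three separate sequential scans with early returns.
import Mathlib
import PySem

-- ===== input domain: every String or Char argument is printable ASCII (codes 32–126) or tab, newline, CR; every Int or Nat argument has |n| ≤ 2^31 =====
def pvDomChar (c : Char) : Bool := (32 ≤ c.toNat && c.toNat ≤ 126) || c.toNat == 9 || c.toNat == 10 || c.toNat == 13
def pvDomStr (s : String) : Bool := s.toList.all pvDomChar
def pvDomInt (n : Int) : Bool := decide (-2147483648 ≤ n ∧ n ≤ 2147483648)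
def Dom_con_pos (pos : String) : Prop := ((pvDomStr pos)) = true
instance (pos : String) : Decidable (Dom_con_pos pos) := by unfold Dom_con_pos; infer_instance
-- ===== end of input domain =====

-- B replaces A's three early-return scans by one fold computing the minimum priority rank, then a table lookup; objective: alternative.

-- ===== PORT A =====
-- 'for p in pos: if p == c: return r' — a scan returning on the first match
def conPosScan (c : Char) (r : String) : List Char → Option String
  | [] => none
  | p :: rest => if p = c then some r else conPosScan c r rest

def con_pos (pos : String) : String :=
  match conPosScan 'M' "MID" pos.toList with
  | some r => r
  | none =>
    match conPosScan 'B' "DEF" pos.toList with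
    | some r => r
    | none =>
      match conPosScan 'G' "GK" pos.toList with
      | some r => r
      | none => "FWD"

-- ===== PORT B =====
-- rank.get(p, 3)
def conPosRank (p : Char) : Nat :=
  PySem.Dict.getD (PySem.Dict.ofList [('M', 0), ('B', 1), ('G', 2)]) p 3

def con_pos_alt (pos : String) : String :=
  let best := pos.toList.foldl (fun b p => min b (conPosRank p)) 3
  -- ('MID','DEF','GK','FWD')[best]; best ≤ 3 so the index is always in range
  (PySem.List.pyGet? ["MID", "DEF", "GK", "FWD"] (best : Int)).getD ""

-- ===== PRECONDITION & SPEC =====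
def Spec_con_pos (pos : String) (out : String) : Prop := out = con_pos_alt pos
instance (pos : String) (out : String) : Decidable (Spec_con_pos pos out) := by unfold Spec_con_pos; infer_instance

-- ===== CLAIM (what is proved, stated in full; the proofs are below) =====
def Claim_equal_con_pos : Prop := ∀ (pos : String), Dom_con_pos pos → Spec_con_pos pos (con_pos pos)

-- ===== LEMMAS AND PROOFS =====
theorem conPosScan_eq (c : Char) (r : String) (l : List Char) :
    conPosScan c r l = if c ∈ l then some r else none := by
  induction l with
  | nil => simp [conPosScan]
  | cons p rest ih =>
    by_cases h : p = c
    · simp [conPosScan, h]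
    · have h' : ¬ c = p := fun e => h e.symm
      simp [conPosScan, h, h', ih]

theorem conPosRank_eq (p : Char) :
    conPosRank p = if p = 'M' then 0 else if p = 'B' then 1 else if p = 'G' then 2 else 3 := by
  simp [conPosRank, PySem.Dict.ofList, PySem.Dict.update, PySem.Dict.getD_insert,
    PySem.Dict.getD_empty]
  split_ifs <;> simp_all

-- the fold computes the nested-if minimum rank
set_option maxHeartbeats 1000000 in
theorem conPosFold_eq (l : List Char) (b : Nat) (hb : b ≤ 3) :
    l.foldl (fun a p => min a (conPosRank p)) b =
      min b (if 'M' ∈ l then 0 else if 'B' ∈ l then 1 else if 'G' ∈ l then 2 else 3) := by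
  induction l generalizing b with
  | nil => simp [Nat.min_eq_left hb]
  | cons p rest ih =>
    have hrank : conPosRank p ≤ 3 := by
      rw [conPosRank_eq]; split_ifs <;> omega
    have := ih (min b (conPosRank p)) (le_trans (Nat.min_le_right _ _) hrank)
    simp only [List.foldl_cons, this]
    rw [conPosRank_eq]
    by_cases h1 : p = 'M' <;> by_cases h2 : p = 'B' <;> by_cases h3 : p = 'G' <;>
      by_cases hM : 'M' ∈ rest <;> by_cases hB : 'B' ∈ rest <;> by_cases hG : 'G' ∈ rest <;>
      simp_all [@eq_comm Char] <;> omega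

-- ===== VERDICT (by name: the statement is the Claim_ definition above) =====
theorem con_pos_spec : Claim_equal_con_pos := by
  intro pos _
  unfold Spec_con_pos con_pos con_pos_alt
  simp only [conPosScan_eq, conPosFold_eq pos.toList 3 (le_refl 3)]
  by_cases hM : 'M' ∈ pos.toList <;>
  by_cases hB : 'B' ∈ pos.toList <;>
  by_cases hG : 'G' ∈ pos.toList <;>
    simp only [hM, hB, hG, if_true, if_false] <;> decide
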